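-- pv_equiv track=rewrite | github.com/Skaft/aoc | 2019/day18/aoc18.py | parse
-- ===== SOURCE A (Python) =====
-- def parse(string):
--     keys = {}
--     doors = {}
--     nodes = set()
--     positions = []
--     for y, line in enumerate(string.split('\n')):
--         for x, char in enumerate(line):
--             if char == '#':
--                 continue
--             if char == '.':
--                 nodes.add((x, y))
--             elif char == '@':
--                 positions.append((x, y))
--                 nodes.add((x, y))
--             elif char.islower():
--                 keys[char] = (x, y)
--             elif char.isupper():
--                 doors[char] = (x, y)
--     return positions, keys, doors, nodes
-- ===== SOURCE B (Python) =====
-- def parse(string):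
--     grid = [(x, y, c)
--             for y, line in enumerate(string.split('\n'))
--             for x, c in enumerate(line)]
--     positions = [(x, y) for x, y, c in grid if c == '@']
--     keys = {c: (x, y) for x, y, c in grid if c.islower()}
--     doors = {c: (x, y) for x, y, c in grid if c.isupper()}
--     nodes = {(x, y) for x, y, c in grid if c in '.@'}
--     return positions, keys, doors, nodes
-- ===== Notes on version B (the rewrite author's own statement) =====
-- stated objective: simpler
-- what changed: A classifies each cell in one nested loop threading four accumulators through a branch chain; B flattens the grid once with enumerate and builds positions, keys, doors and nodes each by its own independent filtered comprehension.
import Mathlib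
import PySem

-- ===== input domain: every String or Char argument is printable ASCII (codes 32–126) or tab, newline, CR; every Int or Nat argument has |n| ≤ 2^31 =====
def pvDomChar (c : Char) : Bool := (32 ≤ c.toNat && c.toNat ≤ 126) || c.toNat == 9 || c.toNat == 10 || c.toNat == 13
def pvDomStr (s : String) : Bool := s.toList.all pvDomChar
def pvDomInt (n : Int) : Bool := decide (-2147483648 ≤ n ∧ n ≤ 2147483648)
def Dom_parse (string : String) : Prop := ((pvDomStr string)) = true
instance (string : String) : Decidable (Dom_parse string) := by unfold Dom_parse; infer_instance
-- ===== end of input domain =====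

-- B replaces A's single classifying pass (one loop, four accumulators, a branch chain) by four
-- independent filtered comprehensions over the flattened enumerated grid (objective: simpler).

-- ===== PORT A =====
-- state: (positions, keys, doors, nodes), exactly A's four accumulators
def parseStep (y : Int)
    (st : (List (Int × Int)) × PySem.Dict String (Int × Int) × PySem.Dict String (Int × Int) × PySem.Set (Int × Int))
    (xc : Int × Char) :
    (List (Int × Int)) × PySem.Dict String (Int × Int) × PySem.Dict String (Int × Int) × PySem.Set (Int × Int) :=
  let (positions, keys, doors, nodes) := st
  let (x, char) := xc
  if char = '#' then (positions, keys, doors, nodes)            -- continue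
  else if char = '.' then (positions, keys, doors, nodes.add (x, y))
  else if char = '@' then (positions ++ [(x, y)], keys, doors, nodes.add (x, y))
  else if PySem.Chars.islower char then (positions, keys.insert (String.mk [char]) (x, y), doors, nodes)
  else if PySem.Chars.isupper char then (positions, keys, doors.insert (String.mk [char]) (x, y), nodes)
  else (positions, keys, doors, nodes)

def parse (string : String) : (List (Int × Int)) × (List (String × Int × Int)) × (List (String × Int × Int)) × (List (Int × Int)) :=
  -- string.split('\n'): sep is nonempty so split? is always some
  let lines := (PySem.Str.split? string "\n").getD []
  let st := (PySem.List.enumerate lines 0).foldl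
    (fun st yl =>
      (PySem.List.enumerate yl.2.toList 0).foldl (parseStep yl.1) st)
    ([], PySem.Dict.empty, PySem.Dict.empty, [])
  (st.1, st.2.1.items, st.2.2.1.items, st.2.2.2)

-- ===== PORT B =====
def parseGrid (string : String) : List (Int × Int × Char) :=
  ((PySem.List.enumerate ((PySem.Str.split? string "\n").getD []) 0).flatMap
    fun yl => (PySem.List.enumerate yl.2.toList 0).map fun xc => (xc.1, yl.1, xc.2))

def parse_alt (string : String) : (List (Int × Int)) × (List (String × Int × Int)) × (List (String × Int × Int)) × (List (Int × Int)) :=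
  let grid := parseGrid string
  let positions := grid.filterMap fun t => if t.2.2 = '@' then some (t.1, t.2.1) else none
  let keys := PySem.Dict.ofList (grid.filterMap fun t =>
    if PySem.Chars.islower t.2.2 then some (String.mk [t.2.2], (t.1, t.2.1)) else none)
  let doors := PySem.Dict.ofList (grid.filterMap fun t =>
    if PySem.Chars.isupper t.2.2 then some (String.mk [t.2.2], (t.1, t.2.1)) else none)
  let nodes : PySem.Set (Int × Int) := PySem.Set.ofList (grid.filterMap fun t =>
    if t.2.2 = '.' ∨ t.2.2 = '@' then some (t.1, t.2.1) else none)
  (positions, keys.items, doors.items, nodes)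

-- ===== PRECONDITION & SPEC =====
def Spec_parse (string : String) (out : (List (Int × Int)) × (List (String × Int × Int)) × (List (String × Int × Int)) × (List (Int × Int))) : Prop := out = parse_alt string
instance (string : String) (out : (List (Int × Int)) × (List (String × Int × Int)) × (List (String × Int × Int)) × (List (Int × Int))) : Decidable (Spec_parse string out) := by unfold Spec_parse; infer_instance

-- ===== CLAIM (what is proved, stated in full; the proofs are below) =====
def Claim_equal_parse : Prop := ∀ (string : String), Dom_parse string → Spec_parse string (parse string)

-- ===== LEMMAS AND PROOFS =====

-- A's step, written componentwise (the four accumulators evolve independently)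
theorem parseStep_split (y : Int)
    (st : (List (Int × Int)) × PySem.Dict String (Int × Int) × PySem.Dict String (Int × Int) × PySem.Set (Int × Int))
    (xc : Int × Char) :
    parseStep y st xc =
      ((if xc.2 = '@' then st.1 ++ [(xc.1, y)] else st.1),
       (if PySem.Chars.islower xc.2 then st.2.1.insert (String.mk [xc.2]) (xc.1, y) else st.2.1),
       (if PySem.Chars.isupper xc.2 then st.2.2.1.insert (String.mk [xc.2]) (xc.1, y) else st.2.2.1),
       (if xc.2 = '.' ∨ xc.2 = '@' then st.2.2.2.add (xc.1, y) else st.2.2.2)) := by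
  obtain ⟨p, k, d, n⟩ := st
  obtain ⟨x, c⟩ := xc
  simp only [parseStep]
  by_cases h1 : c = '#'
  · subst h1; simp [PySem.Chars.islower, PySem.Chars.isupper]
  · by_cases h2 : c = '.'
    · subst h2; simp [PySem.Chars.islower, PySem.Chars.isupper]
    · by_cases h3 : c = '@'
      · subst h3; simp [PySem.Chars.islower, PySem.Chars.isupper]
      · by_cases h4 : PySem.Chars.islower c
        · have h5 : PySem.Chars.isupper c = false := by
            have e1 : 'a'.val.toNat = 97 := rfl
            have e2 : 'Z'.val.toNat = 90 := rfl
            simp only [PySem.Chars.islower, PySem.Chars.isupper, Bool.and_eq_true,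
              decide_eq_true_eq, Bool.and_eq_false_iff, decide_eq_false_iff_not,
              Char.le_def, UInt32.le_iff_toNat_le, e1, e2] at h4 ⊢
            omega
          simp [h1, h2, h3, h4, h5]
        · by_cases h5 : PySem.Chars.isupper c <;> simp [h1, h2, h3, h4, h5]

-- A's fold over any triple list splits into four independent folds
theorem foldl_step4_split (g : List (Int × Int × Char))
    (p : List (Int × Int)) (k d : PySem.Dict String (Int × Int)) (n : PySem.Set (Int × Int)) :
    g.foldl (fun st t => parseStep t.2.1 st (t.1, t.2.2)) (p, k, d, n) =
      (g.foldl (fun p t => if t.2.2 = '@' then p ++ [(t.1, t.2.1)] else p) p,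
       g.foldl (fun k t => if PySem.Chars.islower t.2.2 then k.insert (String.mk [t.2.2]) (t.1, t.2.1) else k) k,
       g.foldl (fun d t => if PySem.Chars.isupper t.2.2 then d.insert (String.mk [t.2.2]) (t.1, t.2.1) else d) d,
       g.foldl (fun n t => if t.2.2 = '.' ∨ t.2.2 = '@' then n.add (t.1, t.2.1) else n) n) := by
  induction g generalizing p k d n with
  | nil => rfl
  | cons t g ih =>
    simp only [List.foldl_cons]
    rw [parseStep_split, ih]

-- a conditional-append fold is the filterMap
theorem foldl_append_if_eq_filterMap {α β : Type} (P : α → Prop) [DecidablePred P]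
    (f : α → β) (g : List α) (acc : List β) :
    g.foldl (fun acc t => if P t then acc ++ [f t] else acc) acc =
      acc ++ g.filterMap (fun t => if P t then some (f t) else none) := by
  induction g generalizing acc with
  | nil => simp
  | cons t g ih => by_cases h : P t <;> simp [h, ih]

-- a conditional-insert fold from empty is Dict.ofList of the filterMap
theorem foldl_insert_if_eq_ofList {α : Type} (P : α → Prop) [DecidablePred P]
    (key : α → String) (val : α → Int × Int) (g : List α) (k : PySem.Dict String (Int × Int)) :
    g.foldl (fun k t => if P t then k.insert (key t) (val t) else k) k =
      k.update (g.filterMap fun t => if P t then some (key t, val t) else none) := by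
  induction g generalizing k with
  | nil => rfl
  | cons t g ih =>
    by_cases h : P t <;> simp [h, ih, PySem.Dict.update]

-- a conditional Set.add fold from empty is Set.ofList of the filterMap
theorem foldl_add_if_eq_ofList {α : Type} (P : α → Prop) [DecidablePred P]
    (f : α → Int × Int) (g : List α) (n : PySem.Set (Int × Int)) :
    g.foldl (fun n t => if P t then n.add (f t) else n) n =
      PySem.Set.update n (g.filterMap fun t => if P t then some (f t) else none) := by
  induction g generalizing n with
  | nil => rfl
  | cons t g ih =>
    by_cases h : P t <;> simp [h, ih, PySem.Set.update]

-- A's nested enumerate loops are the single fold over the flattened grid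
theorem nested_fold_eq_grid_fold (ls : List (Int × String))
    (st : (List (Int × Int)) × PySem.Dict String (Int × Int) × PySem.Dict String (Int × Int) × PySem.Set (Int × Int)) :
    ls.foldl (fun st yl => (PySem.List.enumerate yl.2.toList 0).foldl (parseStep yl.1) st) st =
      (ls.flatMap fun yl => (PySem.List.enumerate yl.2.toList 0).map fun xc => (xc.1, yl.1, xc.2)).foldl
        (fun st t => parseStep t.2.1 st (t.1, t.2.2)) st := by
  induction ls generalizing st with
  | nil => rfl
  | cons yl ls ih =>
    simp only [List.foldl_cons, List.flatMap_cons, List.foldl_append, List.foldl_map]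
    rw [ih]

-- ===== VERDICT (by name: the statement is the Claim_ definition above) =====
theorem parse_spec : Claim_equal_parse := by
  intro s _
  show parse s = parse_alt s
  unfold parse parse_alt parseGrid
  dsimp only
  rw [nested_fold_eq_grid_fold, foldl_step4_split]
  dsimp only
  rw [foldl_append_if_eq_filterMap (fun t : Int × Int × Char => t.2.2 = '@') (fun t => (t.1, t.2.1))]
  rw [foldl_insert_if_eq_ofList (fun t : Int × Int × Char => PySem.Chars.islower t.2.2)
        (fun t => String.mk [t.2.2]) (fun t => (t.1, t.2.1))]
  rw [foldl_insert_if_eq_ofList (fun t : Int × Int × Char => PySem.Chars.isupper t.2.2)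
        (fun t => String.mk [t.2.2]) (fun t => (t.1, t.2.1))]
  rw [foldl_add_if_eq_ofList (fun t : Int × Int × Char => t.2.2 = '.' ∨ t.2.2 = '@') (fun t => (t.1, t.2.1))]
  simp [PySem.Dict.ofList, PySem.Set.update_nil_left]
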